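-- pv_equiv track=rewrite | github.com/etozhekimm/lab2 | lab2.8/individual.py | select_student
-- ===== SOURCE A (Python) =====
-- def select_student(staff, phone):
--     # Проверить сведения людей из списка.
--     result = ""
--     found = False
--     for one in staff:
--         if one.get('phone', '') == phone:
--             result = one.get('name', '')
--             found = True
--     if not found:
--         return "Нет человека с таким номером."
--     else:
--         return result
-- ===== SOURCE B (Python) =====
-- def select_student(staff, phone):
--     # Scan from the end and return the first (= original's last) match, stopping early.
--     for one in reversed(staff):
--         if one.get('phone', '') == phone:
--             return one.get('name', '')
--     return "Нет человека с таким номером."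
-- ===== Notes on version B (the rewrite author's own statement) =====
-- stated objective: alternative
-- what changed: B scans the list from the end and returns at the first match, instead of A's full forward pass that overwrites a result/found accumulator to keep the last match.
import Mathlib
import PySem

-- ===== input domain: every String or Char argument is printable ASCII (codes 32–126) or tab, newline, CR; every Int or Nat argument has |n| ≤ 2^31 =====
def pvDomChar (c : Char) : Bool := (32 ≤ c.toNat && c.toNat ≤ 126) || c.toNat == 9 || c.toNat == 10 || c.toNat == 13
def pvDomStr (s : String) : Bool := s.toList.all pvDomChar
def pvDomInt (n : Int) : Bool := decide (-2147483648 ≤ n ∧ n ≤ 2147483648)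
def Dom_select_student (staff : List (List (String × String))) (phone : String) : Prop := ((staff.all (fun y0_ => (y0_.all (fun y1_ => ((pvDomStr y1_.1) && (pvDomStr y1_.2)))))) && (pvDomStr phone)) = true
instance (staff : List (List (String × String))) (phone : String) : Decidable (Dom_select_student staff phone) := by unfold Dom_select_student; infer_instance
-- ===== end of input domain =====

-- B scans the list from the end and returns at the first match, instead of A's
-- full forward pass overwriting a result/found accumulator to keep the last match.

-- ===== PORT A =====
-- forward loop carrying (result, found), exactly A's state
def select_student (staff : List (List (String × String))) (phone : String) : String :=
  let st := staff.foldl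
    (fun (acc : String × Bool) one =>
      if (PySem.Dict.mk one).getD "phone" "" = phone then
        ((PySem.Dict.mk one).getD "name" "", true)
      else acc)
    ("", false)
  if !st.2 then "Нет человека с таким номером." else st.1

-- ===== PORT B =====
-- backward scan, first match wins (recursion on the reversed list = Python's
-- `for one in reversed(staff): … return`)
def select_student_alt_go (rev : List (List (String × String))) (phone : String) : String :=
  match rev with
  | [] => "Нет человека с таким номером."
  | one :: rest =>
      if (PySem.Dict.mk one).getD "phone" "" = phone then
        (PySem.Dict.mk one).getD "name" ""
      else select_student_alt_go rest phone

def select_student_alt (staff : List (List (String × String))) (phone : String) : String :=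
  select_student_alt_go staff.reverse phone

-- ===== PRECONDITION & SPEC =====
def Spec_select_student (staff : List (List (String × String))) (phone : String) (out : String) : Prop := out = select_student_alt staff phone
instance (staff : List (List (String × String))) (phone : String) (out : String) : Decidable (Spec_select_student staff phone out) := by unfold Spec_select_student; infer_instance

-- ===== CLAIM (what is proved, stated in full; the proofs are below) =====
def Claim_equal_select_student : Prop := ∀ (staff : List (List (String × String))) (phone : String), Dom_select_student staff phone → Spec_select_student staff phone (select_student staff phone)

-- ===== LEMMAS AND PROOFS =====

theorem select_student_eq_alt (staff : List (List (String × String))) (phone : String) :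
    select_student staff phone = select_student_alt staff phone := by
  induction staff using List.reverseRecOn with
  | nil => rfl
  | append_singleton l d ih =>
      simp only [select_student, select_student_alt, List.foldl_append, List.foldl_cons,
        List.foldl_nil, List.reverse_append, List.reverse_cons, List.reverse_nil,
        List.nil_append, List.cons_append, select_student_alt_go] at *
      by_cases h : (PySem.Dict.mk d).getD "phone" "" = phone
      · simp [h]
      · simp only [if_neg h]
        simpa [Bool.not_eq_true'] using ih

-- ===== VERDICT (by name: the statement is the Claim_ definition above) =====
theorem select_student_spec : Claim_equal_select_student := by
  intro staff phone _
  exact select_student_eq_alt staff phone
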